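-- pv_equiv track=rewrite | github.com/donnelt6/2026-csc1097-donnelt6-szumlig2 | src/apps/api/app/services/store/chat_helpers.py | _has_context_reference
-- ===== SOURCE A (Python) =====
-- from typing import Any, Dict, List, Optional
--
-- def _has_context_reference(tokens: List[str]) -> bool:
--     for index, token in enumerate(tokens):
--         if token in {"that", "it", "those", "these"}:
--             return True
--         if token in {"there", "here"} and index == len(tokens) - 1:
--             return True
--         if token == "this" and index == len(tokens) - 1:
--             return True
--     return False
-- ===== SOURCE B (Python) =====
-- def _has_context_reference(tokens):
--     # Back-to-front right-fold: the rear token is checked against the full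
--     # 7-word reference set (it is the only position where the positional
--     # words count), every earlier token only against the hard-reference set.
--     rev = iter(reversed(tokens))
--     tail = next(rev, None)
--     if tail is None:
--         return False
--     acc = tail in {"that", "it", "those", "these", "there", "here", "this"}
--     for t in rev:
--         acc = acc or t in {"that", "it", "those", "these"}
--     return acc
-- ===== Notes on version B (the rewrite author's own statement) =====
-- stated objective: alternative
-- what changed: Replaces A's indexed front-to-back loop (enumerate with index==len-1 tests in three branches) by a back-to-front right-fold: the rear token is consumed first and checked against the merged 7-word set, then the remaining tokens are folded with an accumulator against the 4-word hard set only, so no indices or length comparisons exist at all.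
import Mathlib
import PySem

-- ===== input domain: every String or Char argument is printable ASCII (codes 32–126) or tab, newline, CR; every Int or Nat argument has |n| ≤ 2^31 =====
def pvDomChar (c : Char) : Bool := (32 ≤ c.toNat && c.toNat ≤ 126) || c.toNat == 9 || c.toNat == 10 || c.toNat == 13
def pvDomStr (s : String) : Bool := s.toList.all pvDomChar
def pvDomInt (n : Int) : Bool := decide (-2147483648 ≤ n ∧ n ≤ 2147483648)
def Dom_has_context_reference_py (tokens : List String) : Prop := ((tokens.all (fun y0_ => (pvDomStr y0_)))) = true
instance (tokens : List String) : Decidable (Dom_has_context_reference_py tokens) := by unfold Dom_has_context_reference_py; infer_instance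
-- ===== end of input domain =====

-- B replaces A's indexed front-to-back loop by a back-to-front fold (rear token first, then an accumulator over the rest); objective: alternative.

-- ===== PORT A =====
-- the enumerate loop: n is len(tokens), i the current index
def hcrLoopA (n : Nat) (i : Nat) : List String → Bool
  | [] => false
  | t :: rest =>
    if t = "that" ∨ t = "it" ∨ t = "those" ∨ t = "these" then true
    else if (t = "there" ∨ t = "here") ∧ i = n - 1 then true
    else if t = "this" ∧ i = n - 1 then true
    else hcrLoopA n (i + 1) rest

def has_context_reference_py (tokens : List String) : Bool :=
  hcrLoopA tokens.length 0 tokens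

-- ===== PORT B =====
-- the fold body of B's loop over the reversed tail
def hcrFoldB (acc : Bool) (t : String) : Bool :=
  acc || (t == "that" || t == "it" || t == "those" || t == "these")

def has_context_reference_py_alt (tokens : List String) : Bool :=
  match tokens.reverse with
  | [] => false
  | tail :: rev =>
    rev.foldl hcrFoldB
      (tail == "that" || tail == "it" || tail == "those" || tail == "these" ||
       tail == "there" || tail == "here" || tail == "this")

-- ===== PRECONDITION & SPEC =====
def Spec_has_context_reference_py (tokens : List String) (out : Bool) : Prop := out = has_context_reference_py_alt tokens
instance (tokens : List String) (out : Bool) : Decidable (Spec_has_context_reference_py tokens out) := by unfold Spec_has_context_reference_py; infer_instance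

-- ===== CLAIM (what is proved, stated in full; the proofs are below) =====
def Claim_equal_has_context_reference_py : Prop := ∀ (tokens : List String), Dom_has_context_reference_py tokens → Spec_has_context_reference_py tokens (has_context_reference_py tokens)

-- ===== LEMMAS AND PROOFS =====

-- loop invariant for A: with i + ts.length = n, the loop returns "some token is a hard
-- reference word, or the last token is a positional word"
theorem hcrLoopA_char (n i : Nat) (ts : List String) (h : i + ts.length = n) :
    hcrLoopA n i ts =
      (ts.any (fun t => t == "that" || t == "it" || t == "those" || t == "these") ||
        (match ts.getLast? with
         | some t => t == "there" || t == "here" || t == "this"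
         | none => false)) := by
  induction ts generalizing i with
  | nil => simp [hcrLoopA]
  | cons t rest ih =>
    simp only [hcrLoopA]
    by_cases hs : t = "that" ∨ t = "it" ∨ t = "those" ∨ t = "these"
    · simp [hs]
      rcases hs with h | h | h | h <;> simp [h]
    · rw [if_neg hs]
      rcases rest with _ | ⟨r, rs⟩
      · -- last element: i = n - 1
        simp at h
        have hi : i = n - 1 := by omega
        by_cases hp : t = "there" ∨ t = "here"
        · rcases hp with h | h <;> simp [h, hi]
        · rw [if_neg (by tauto)]
          by_cases ht : t = "this"
          · simp [ht, hi]
          · push_neg at hs hp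
            simp [ht, hcrLoopA, beq_eq_false_iff_ne.mpr hs.1, beq_eq_false_iff_ne.mpr hs.2.1,
                  beq_eq_false_iff_ne.mpr hs.2.2.1, beq_eq_false_iff_ne.mpr hs.2.2.2,
                  beq_eq_false_iff_ne.mpr hp.1, beq_eq_false_iff_ne.mpr hp.2]
      · -- not the last element: i ≠ n - 1
        have hi : i ≠ n - 1 := by simp at h; omega
        rw [if_neg (by tauto), if_neg (by tauto)]
        rw [ih (i + 1) (by simp at h ⊢; omega)]
        push_neg at hs
        simp [beq_eq_false_iff_ne.mpr hs.1, beq_eq_false_iff_ne.mpr hs.2.1,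
              beq_eq_false_iff_ne.mpr hs.2.2.1, beq_eq_false_iff_ne.mpr hs.2.2.2]

-- B's fold equals "initial accumulator or some element is a hard reference word"
theorem hcrFoldB_char (b : Bool) (ts : List String) :
    ts.foldl hcrFoldB b =
      (b || ts.any (fun t => t == "that" || t == "it" || t == "those" || t == "these")) := by
  induction ts generalizing b with
  | nil => simp
  | cons t rest ih =>
    simp only [List.foldl_cons, List.any_cons, ih, hcrFoldB]
    cases b <;> simp

-- ===== VERDICT (by name: the statement is the Claim_ definition above) =====
theorem has_context_reference_py_spec : Claim_equal_has_context_reference_py := by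
  intro tokens _
  unfold Spec_has_context_reference_py has_context_reference_py
  rw [hcrLoopA_char tokens.length 0 tokens (by simp)]
  rcases List.eq_nil_or_concat tokens with h | ⟨ys, x, h⟩
  · subst h; simp [has_context_reference_py_alt]
  · subst h
    unfold has_context_reference_py_alt
    simp only [hcrFoldB_char]
    simp [Bool.or_comm, Bool.or_left_comm, Bool.or_assoc]
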